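-- pv_equiv track=rewrite | github.com/elsevierlabs-os/nerds | nerds/utils.py | unflatten_list
-- ===== SOURCE A (Python) =====
-- def unflatten_list(xs_flat, xs_lengths):
--     """ Reverse operation of flatten_list. Using the flattened list and the list
--         of list lengths of the inner list, reconstructs original list(list(str)).
--
--         Args:
--             xs_flat list(str): the flattened list.
--             xs_lengths list(int): list of inner list to group by.
--
--         Returns:
--             xs_unflat list(list(str)): original list of list(list(str))
--     """
--     xs_unflat = []
--     start = 0
--     for l in xs_lengths:
--         end = start + l
--         xs_unflat.append(xs_flat[start:end])
--         start = end
--     return xs_unflat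
-- ===== SOURCE B (Python) =====
-- def unflatten_list(xs_flat, xs_lengths):
--     # Precompute the cumulative boundary offsets, then slice between
--     # consecutive boundaries (different decomposition from the running
--     # start-accumulator loop).
--     bounds = [0]
--     for l in xs_lengths:
--         bounds.append(bounds[-1] + l)
--     return [xs_flat[bounds[i]:bounds[i + 1]] for i in range(len(xs_lengths))]
-- ===== Notes on version B (the rewrite author's own statement) =====
-- stated objective: alternative
-- what changed: B precomputes the list of cumulative boundary offsets in one pass and then builds the result by slicing between consecutive boundaries via zip, instead of A's running-start accumulator that appends a slice inside the same loop.
import Mathlib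
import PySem

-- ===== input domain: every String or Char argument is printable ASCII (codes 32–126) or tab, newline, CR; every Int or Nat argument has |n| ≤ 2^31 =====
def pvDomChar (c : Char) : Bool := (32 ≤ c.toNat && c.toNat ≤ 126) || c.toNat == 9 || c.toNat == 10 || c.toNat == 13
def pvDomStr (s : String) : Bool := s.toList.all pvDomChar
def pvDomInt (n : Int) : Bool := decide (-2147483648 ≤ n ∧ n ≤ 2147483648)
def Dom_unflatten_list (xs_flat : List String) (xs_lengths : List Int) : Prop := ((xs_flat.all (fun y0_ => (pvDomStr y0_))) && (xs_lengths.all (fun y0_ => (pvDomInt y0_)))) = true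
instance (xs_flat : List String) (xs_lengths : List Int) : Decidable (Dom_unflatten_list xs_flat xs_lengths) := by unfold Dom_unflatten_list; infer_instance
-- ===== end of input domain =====

-- B replaces A's running-start accumulator loop with a precomputed table of
-- cumulative boundary offsets followed by a zip-and-slice pass (alternative
-- decomposition, same cost).


-- ===== PORT A =====
-- for l in xs_lengths: end = start + l; append xs_flat[start:end]; start = end
def unflatten_list (xs_flat : List String) (xs_lengths : List Int) : List (List String) :=
  (xs_lengths.foldl
    (fun (st : Int × List (List String)) l =>
      let e := st.1 + l
      (e, st.2 ++ [PySem.List.slice xs_flat (some st.1) (some e)]))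
    (0, [])).2

-- ===== PORT B =====
-- bounds = [0]; for l: bounds.append(bounds[-1] + l)
def unflatten_bounds (s : Int) : List Int → List Int
  | [] => [s]
  | l :: ls => s :: unflatten_bounds (s + l) ls

-- [xs_flat[bounds[i]:bounds[i+1]] for i in range(len(xs_lengths))]
-- (bounds[i] is always in range, so pyGet? never yields none here)
def unflatten_list_alt (xs_flat : List String) (xs_lengths : List Int) : List (List String) :=
  let bounds := unflatten_bounds 0 xs_lengths
  (List.range xs_lengths.length).map (fun (i : Nat) =>
    PySem.List.slice xs_flat (PySem.List.pyGet? bounds (i : Int))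
      (PySem.List.pyGet? bounds ((i : Int) + 1)))

-- ===== PRECONDITION & SPEC =====
def Spec_unflatten_list (xs_flat : List String) (xs_lengths : List Int) (out : List (List String)) : Prop := out = unflatten_list_alt xs_flat xs_lengths
instance (xs_flat : List String) (xs_lengths : List Int) (out : List (List String)) : Decidable (Spec_unflatten_list xs_flat xs_lengths out) := by unfold Spec_unflatten_list; infer_instance

-- ===== CLAIM (what is proved, stated in full; the proofs are below) =====
def Claim_equal_unflatten_list : Prop := ∀ (xs_flat : List String) (xs_lengths : List Int), Dom_unflatten_list xs_flat xs_lengths → Spec_unflatten_list xs_flat xs_lengths (unflatten_list xs_flat xs_lengths)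

-- ===== LEMMAS AND PROOFS =====
theorem unflatten_loop_eq (xs_flat : List String) (ls : List Int) (s : Int)
    (acc : List (List String)) :
    (ls.foldl
      (fun (st : Int × List (List String)) l =>
        let e := st.1 + l
        (e, st.2 ++ [PySem.List.slice xs_flat (some st.1) (some e)]))
      (s, acc)).2 =
    acc ++ ((unflatten_bounds s ls).zip (unflatten_bounds s ls).tail).map
      (fun p => PySem.List.slice xs_flat (some p.1) (some p.2)) := by
  induction ls generalizing s acc with
  | nil => simp [unflatten_bounds]
  | cons l ls ih =>
    simp only [List.foldl_cons, unflatten_bounds]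
    rw [ih]
    cases ls with
    | nil => simp [unflatten_bounds]
    | cons l' ls' => simp [unflatten_bounds]

theorem range_map_pairs (xs_flat : List String) :
    ∀ (bs : List Int) (b : Int),
    (List.range bs.length).map (fun (i : Nat) =>
      PySem.List.slice xs_flat (PySem.List.pyGet? (b :: bs) (i : Int))
        (PySem.List.pyGet? (b :: bs) ((i : Int) + 1))) =
    ((b :: bs).zip bs).map (fun p => PySem.List.slice xs_flat (some p.1) (some p.2)) := by
  intro bs
  induction bs with
  | nil => intro b; simp
  | cons b' bs' ih =>
    intro b
    rw [List.length_cons, List.range_succ_eq_map]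
    simp only [List.map_cons, List.map_map]
    congr 1
    · simp [PySem.List.pyGet?, PySem.List.pyIdx?,
        show (0 : Int) ≤ (bs'.length : Int) + 1 by positivity]
    · refine Eq.trans (List.map_congr_left ?_) (ih b')
      intro i _
      simp only [Function.comp_apply]
      rw [show ((i.succ : Nat) : Int) = (i : Int) + 1 by push_cast; ring,
        PySem.List.pyGet?_cons_succ,
        show ((i : Int) + 1 + 1) = ((i : Int) + 1) + 1 by ring]
      rw [show ((i : Int) + 1) = ((i + 1 : Nat) : Int) by push_cast; ring,
        PySem.List.pyGet?_cons_succ]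

theorem unflatten_bounds_cons (s : Int) (ls : List Int) :
    ∃ bs : List Int, unflatten_bounds s ls = s :: bs ∧ bs.length = ls.length := by
  induction ls generalizing s with
  | nil => exact ⟨[], rfl, rfl⟩
  | cons l ls ih =>
    obtain ⟨bs, h1, h2⟩ := ih (s + l)
    exact ⟨unflatten_bounds (s + l) ls, rfl, by simp [h1, h2]⟩

-- ===== VERDICT (by name: the statement is the Claim_ definition above) =====
theorem unflatten_list_spec : Claim_equal_unflatten_list := by
  intro xs_flat xs_lengths _
  unfold Spec_unflatten_list unflatten_list unflatten_list_alt
  obtain ⟨bs, h1, h2⟩ := unflatten_bounds_cons 0 xs_lengths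
  simp only [h1, ← h2, range_map_pairs xs_flat bs 0]
  simpa [h1] using unflatten_loop_eq xs_flat xs_lengths 0 []
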